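-- pv_equiv track=rewrite | github.com/SheldonHH/algorithm-journey | src/class030/C6_OneKind.py | find
-- ===== SOURCE A (Python) =====
-- def find(arr, m):
--     # Initialize a counter for each bit position
--     cnts = [0] * 32
--
--     # Count the number of 1s at each bit position across all numbers
--     for num in arr:
--         for i in range(32):
--             cnts[i] += (num >> i) & 1
--
--     ans = 0
--     # Use the modulo operation to determine which bits should be set in the result
--     for i in range(32):
--         if cnts[i] % m != 0:
--             ans |= (1 << i)
--
--     return ans
-- ===== SOURCE B (Python) =====
-- def find(arr, m):
--     # Collapse duplicates with a frequency map, then cancel whole groups of m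
--     # equal values (they contribute 0 to every bit count mod m); per-bit sums
--     # run over the few surviving (value, residue) pairs only.
--     freq = {}
--     for num in arr:
--         freq[num] = freq.get(num, 0) + 1
--     reduced = [(v, c % m) for v, c in freq.items() if c % m != 0]
--     ans = 0
--     for i in range(32):
--         cnt = 0
--         for v, r in reduced:
--             cnt += r * ((v >> i) & 1)
--         if cnt % m != 0:
--             ans |= 1 << i
--     return ans
-- ===== Notes on version B (the rewrite author's own statement) =====
-- stated objective: alternative
-- what changed: Replaces the single pass maintaining a cnts[32] table with a frequency map: duplicates are collapsed, values occurring a multiple of m times are cancelled outright (their residue is 0 mod m), and each bit is decided from the surviving (value, count-residue) pairs.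
import Mathlib
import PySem

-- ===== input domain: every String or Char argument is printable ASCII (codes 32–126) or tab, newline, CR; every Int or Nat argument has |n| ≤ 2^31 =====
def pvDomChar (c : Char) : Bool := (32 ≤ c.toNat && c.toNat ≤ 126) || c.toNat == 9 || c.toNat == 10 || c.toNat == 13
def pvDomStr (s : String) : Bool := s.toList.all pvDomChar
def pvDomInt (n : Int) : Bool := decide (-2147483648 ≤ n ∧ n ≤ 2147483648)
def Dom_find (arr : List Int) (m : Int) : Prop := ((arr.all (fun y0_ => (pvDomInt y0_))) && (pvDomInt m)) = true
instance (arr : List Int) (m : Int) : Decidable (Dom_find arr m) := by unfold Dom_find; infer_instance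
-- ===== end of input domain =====

-- B replaces A's maintained cnts[32] table with a frequency map: duplicates collapse, groups of m equal values cancel (residue 0 mod m), and each bit is decided from the surviving (value, residue) pairs (alternative decomposition, no speed claim).


-- ===== PORT A =====
-- (num >> i) & 1
def pvBit (num : Int) (i : Nat) : Int := PySem.Int.band (num >>> i) 1

def find (arr : List Int) (m : Int) : Int :=
  -- cnts = [0] * 32
  let cnts : List Int := List.replicate 32 0
  -- for num in arr: for i in range(32): cnts[i] += (num >> i) & 1
  let cnts := arr.foldl
    (fun c num => (List.range 32).foldl (fun c i => c.set i (c.getD i 0 + pvBit num i)) c) cnts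
  -- ans = 0; for i in range(32): if cnts[i] % m != 0: ans |= (1 << i)
  (List.range 32).foldl
    (fun ans i => if PySem.Int.mod (cnts.getD i 0) m ≠ 0 then PySem.Int.bor ans ((1 : Int) <<< i) else ans) 0

-- ===== PORT B =====
def find_alt (arr : List Int) (m : Int) : Int :=
  -- freq = {}; for num in arr: freq[num] = freq.get(num, 0) + 1
  let freq := arr.foldl (fun d num => d.insert num (d.getD num 0 + 1)) PySem.Dict.empty
  -- reduced = [(v, c % m) for v, c in freq.items() if c % m != 0]
  let reduced := (freq.items.filter (fun p => PySem.Int.mod p.2 m ≠ 0)).map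
    (fun p => (p.1, PySem.Int.mod p.2 m))
  -- ans = 0; for i in range(32): cnt = 0; for v, r in reduced: cnt += r * ((v >> i) & 1); if cnt % m != 0: ans |= 1 << i
  (List.range 32).foldl
    (fun ans i =>
      let cnt := reduced.foldl (fun s p => s + p.2 * pvBit p.1 i) 0
      if PySem.Int.mod cnt m ≠ 0 then PySem.Int.bor ans ((1 : Int) <<< i) else ans) 0

-- ===== PRECONDITION & SPEC =====
-- Pre_ excludes m = 0, on which Python A raises ZeroDivisionError (cnts[i] % m).
def Pre_find (arr : List Int) (m : Int) : Prop := m ≠ 0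
instance (arr : List Int) (m : Int) : Decidable (Pre_find arr m) := by unfold Pre_find; infer_instance
def pvWitness_find : List Int × Int := ([3, -1, 5], 2)

def Spec_find (arr : List Int) (m : Int) (out : Int) : Prop := out = find_alt arr m
instance (arr : List Int) (m : Int) (out : Int) : Decidable (Spec_find arr m out) := by unfold Spec_find; infer_instance

-- ===== CLAIM (what is proved, stated in full; the proofs are below) =====
def Claim_equal_find : Prop := ∀ (arr : List Int) (m : Int), Dom_find arr m → Pre_find arr m → Spec_find arr m (find arr m)

-- ===== LEMMAS AND PROOFS =====

-- the inner Python loop 'for i in range(32): cnts[i] += bit' leaves length unchanged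
theorem pvInner_length (num : Int) (n : Nat) (c : List Int) :
    ((List.range n).foldl (fun c i => c.set i (c.getD i 0 + pvBit num i)) c).length = c.length := by
  induction n generalizing c with
  | zero => rfl
  | succ n ih =>
      rw [List.range_succ, List.foldl_append, List.foldl_cons, List.foldl_nil, List.length_set]
      exact ih c

-- entries at indices ≥ n are untouched by the fold over range n
theorem pvInner_getD_ge (num : Int) (n j : Nat) (hj : n ≤ j) (c : List Int) :
    ((List.range n).foldl (fun c i => c.set i (c.getD i 0 + pvBit num i)) c).getD j 0 = c.getD j 0 := by
  induction n generalizing c with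
  | zero => rfl
  | succ n ih =>
      rw [List.range_succ, List.foldl_append, List.foldl_cons, List.foldl_nil,
        List.getD_eq_getElem?_getD, List.getElem?_set_ne (by omega), ← List.getD_eq_getElem?_getD]
      exact ih (by omega) c

-- the inner fold adds the bit of num at each position j < n (for j < c.length)
theorem pvInner_getD (num : Int) (n j : Nat) (hj : j < n) (c : List Int) (hc : j < c.length) :
    ((List.range n).foldl (fun c i => c.set i (c.getD i 0 + pvBit num i)) c).getD j 0
      = c.getD j 0 + pvBit num j := by
  induction n generalizing c with
  | zero => omega
  | succ n ih =>
      rw [List.range_succ, List.foldl_append]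
      simp only [List.foldl_cons, List.foldl_nil]
      by_cases h : j = n
      · subst h
        rw [List.getD_eq_getElem?_getD, List.getElem?_set_self (by rw [pvInner_length]; exact hc),
          Option.getD_some, pvInner_getD_ge num j j (le_refl j) c]
      · rw [List.getD_eq_getElem?_getD, List.getElem?_set_ne (by omega), ← List.getD_eq_getElem?_getD]
        exact ih (by omega) c hc

-- after the outer fold over arr, slot j holds its initial value plus the sum of bit j over arr
theorem pvOuter_getD (arr : List Int) (j : Nat) (hj : j < 32) (c : List Int) (hc : c.length = 32) :
    ((arr.foldl (fun c num => (List.range 32).foldl (fun c i => c.set i (c.getD i 0 + pvBit num i)) c) c).getD j 0)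
      = c.getD j 0 + (arr.map (fun num => pvBit num j)).sum := by
  induction arr generalizing c with
  | nil => simp
  | cons num arr ih =>
      simp only [List.foldl_cons, List.map_cons, List.sum_cons]
      rw [ih _ (by rw [pvInner_length]; exact hc), pvInner_getD num 32 j hj c (by omega)]
      ring

-- dropping the comprehension's filter does not change the sum: the dropped terms are 0
theorem pvSum_filter (m : Int) (l : List (Int × Int)) (f : Int × Int → Int)
    (h : ∀ p ∈ l, PySem.Int.mod p.2 m = 0 → f p = 0) :
    ((l.filter (fun p => PySem.Int.mod p.2 m ≠ 0)).map f).sum = (l.map f).sum := by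
  induction l with
  | nil => rfl
  | cons p l ih =>
      rw [List.filter_cons]
      by_cases hp : PySem.Int.mod p.2 m = 0
      · rw [if_neg (by simp [hp]), List.map_cons, List.sum_cons,
          h p List.mem_cons_self hp, zero_add,
          ih (fun q hq => h q (List.mem_cons_of_mem _ hq))]
      · rw [if_pos (by simp [hp]), List.map_cons, List.map_cons, List.sum_cons, List.sum_cons,
          ih (fun q hq => h q (List.mem_cons_of_mem _ hq))]

-- the list sum over arr of f equals the weighted sum over its distinct values
theorem pvSum_count (arr : List Int) (f : Int → Int) :
    (arr.map f).sum = ((PySem.Set.ofList arr).map (fun v => (arr.count v : Int) * f v)).sum := by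
  have hfs : arr.toFinset = (PySem.Set.ofList arr).toFinset := by
    ext v; simp [PySem.Set.mem_ofList]
  rw [Finset.sum_list_map_count arr f, hfs,
    List.sum_toFinset _ (PySem.Set.nodup_ofList arr)]
  refine congrArg List.sum (List.map_congr_left ?_)
  intro v _
  rw [nsmul_eq_mul]

-- ===== VERDICT (by name: the statement is the Claim_ definition above) =====
-- B's per-bit accumulated sum, written as a map-sum
theorem pvAlt_cnt (arr : List Int) (m : Int) (i : Nat) :
    (((arr.foldl (fun d num => d.insert num (d.getD num 0 + 1)) PySem.Dict.empty).items.filter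
        (fun p => PySem.Int.mod p.2 m ≠ 0)).map (fun p => (p.1, PySem.Int.mod p.2 m))).foldl
      (fun s p => s + p.2 * pvBit p.1 i) 0
      = ((PySem.Set.ofList arr).map
          (fun v => PySem.Int.mod ((arr.count v : Int)) m * pvBit v i)).sum := by
  rw [PySem.List.foldl_add _ (fun p : Int × Int => p.2 * pvBit p.1 i) 0]
  rw [PySem.Dict.foldl_insert_getD_add_one_eq_counter, PySem.Dict.items_counter]
  rw [List.map_map]
  rw [pvSum_filter m _ _ (by intro p _ hp; simp [hp])]
  simp [Function.comp_def]

-- m divides a sum difference whenever it divides each term's difference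
theorem pvDvd_sum_sub (m : Int) (l : List Int) (f g : Int → Int)
    (h : ∀ v ∈ l, m ∣ f v - g v) :
    m ∣ ((l.map f).sum - (l.map g).sum) := by
  induction l with
  | nil => simp
  | cons v l ih =>
      simp only [List.map_cons, List.sum_cons]
      have : f v + (l.map f).sum - (g v + (l.map g).sum)
          = (f v - g v) + ((l.map f).sum - (l.map g).sum) := by ring
      rw [this]
      exact dvd_add (h v List.mem_cons_self) (ih (fun v hv => h v (List.mem_cons_of_mem _ hv)))

-- m divides the difference between the true per-bit count and B's residue-weighted count
theorem pvDvd_diff (arr : List Int) (m : Int) (i : Nat) :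
    m ∣ ((arr.map (fun num => pvBit num i)).sum
      - ((PySem.Set.ofList arr).map (fun v => PySem.Int.mod ((arr.count v : Int)) m * pvBit v i)).sum) := by
  rw [pvSum_count arr (fun num => pvBit num i)]
  refine pvDvd_sum_sub m _ _ _ ?_
  intro v _
  have h := PySem.Int.floordiv_mul_add_mod ((arr.count v : Int)) m
  have hv : ((arr.count v : Int)) * pvBit v i - PySem.Int.mod ((arr.count v : Int)) m * pvBit v i
      = m * (PySem.Int.floordiv ((arr.count v : Int)) m * pvBit v i) := by
    have : ((arr.count v : Int)) - PySem.Int.mod ((arr.count v : Int)) m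
        = m * PySem.Int.floordiv ((arr.count v : Int)) m := by linarith
    calc ((arr.count v : Int)) * pvBit v i - PySem.Int.mod ((arr.count v : Int)) m * pvBit v i
        = (((arr.count v : Int)) - PySem.Int.mod ((arr.count v : Int)) m) * pvBit v i := by ring
      _ = m * (PySem.Int.floordiv ((arr.count v : Int)) m * pvBit v i) := by rw [this]; ring
  rw [hv]
  exact Dvd.intro _ rfl

-- ===== VERDICT (by name: the statement is the Claim_ definition above) =====
theorem find_spec : Claim_equal_find := by
  intro arr m _ _
  unfold Spec_find
  simp only [find, find_alt]
  refine PySem.List.foldl_congr_mem _ _ _ _ ?_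
  intro acc i hi
  have hj : i < 32 := by simpa using (List.mem_range.mp hi)
  rw [pvOuter_getD arr i hj (List.replicate 32 0) (by simp)]
  have h0 : (List.replicate 32 (0 : Int)).getD i 0 = 0 := by
    rw [List.getD_eq_getElem?_getD, List.getElem?_replicate]
    simp [hj]
  rw [h0, zero_add, pvAlt_cnt arr m i]
  have hd := pvDvd_diff arr m i
  have hiff : (PySem.Int.mod ((arr.map (fun num => pvBit num i)).sum) m ≠ 0)
      ↔ (PySem.Int.mod (((PySem.Set.ofList arr).map
          (fun v => PySem.Int.mod ((arr.count v : Int)) m * pvBit v i)).sum) m ≠ 0) := by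
    rw [not_iff_not, PySem.Int.mod_eq_zero_iff_dvd, PySem.Int.mod_eq_zero_iff_dvd]
    constructor
    · intro h; have := dvd_sub h hd; simpa using this
    · intro h; have := dvd_add hd h; simpa using this
  by_cases hc : PySem.Int.mod ((arr.map (fun num => pvBit num i)).sum) m ≠ 0
  · rw [if_pos hc, if_pos (hiff.mp hc)]
  · rw [if_neg hc, if_neg (fun h => hc (hiff.mpr h))]
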